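-- pv_equiv track=rewrite | github.com/vaishnavipawar09/Applied-Algorithms | Assignment 7/AA_Assignment7_VP.py | specialHub
-- ===== SOURCE A (Python) =====
-- from typing import List
-- import heapq
--
-- def specialHub(n: int, edges: List[List[int]], distanceThreshold: int) -> int:
--     graph = {i: [] for i in range(n)}
--     for edge1, edge2, weight in edges:
--         graph[edge1].append((edge2, weight))
--         graph[edge2].append((edge1, weight))
--
--     def usingdijkstra(startingcity):
--         citydistances = [float('inf')] * n
--         citydistances[startingcity] = 0
--         priorityqueue = [(0, startingcity)]
--
--         while priorityqueue:
--             current_minDist, currentvertex = heapq.heappop(priorityqueue)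
--
--             if current_minDist > citydistances[currentvertex]:
--                 continue
--
--             for neighborcity, currweight in graph[currentvertex]:
--                 totaldistance = current_minDist + currweight
--                 if totaldistance < citydistances[neighborcity]:
--                     citydistances[neighborcity] = totaldistance
--                     heapq.heappush(
--                         priorityqueue, (totaldistance, neighborcity))
--
--         return citydistances
--
--     leastConnected = float('inf')
--     chosenCity = -1
--
--     for city in range(n):
--         nearbyCities = sum(1 for dist in usingdijkstra(
--             city) if dist <= distanceThreshold and dist != 0)
--
--         if nearbyCities < leastConnected:
--             leastConnected = nearbyCities
--             chosenCity = city
--         elif nearbyCities == leastConnected and city > chosenCity: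
--             chosenCity = city
--
--     return chosenCity
-- ===== SOURCE B (Python) =====
-- from typing import List
--
-- def specialHub(n: int, edges: List[List[int]], distanceThreshold: int) -> int:
--     best = None
--     chosen = -1
--     for s in range(n):
--         # single-source shortest distances by repeated edge relaxation to a fixpoint
--         dist = [None] * n
--         dist[s] = 0
--         changed = True
--         while changed:
--             changed = False
--             for u, v, w in edges:
--                 for a, b in ((u, v), (v, u)):
--                     da = dist[a]
--                     if da is not None and (dist[b] is None or da + w < dist[b]):
--                         dist[b] = da + w
--                         changed = True
--         cnt = sum(1 for d in dist if d is not None and d <= distanceThreshold and d != 0)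
--         if best is None or cnt <= best:
--             best = cnt
--             chosen = s
--     return chosen
-- ===== Notes on version B (the rewrite author's own statement) =====
-- stated objective: simpler
-- what changed: A runs a lazy heap-based Dijkstra from every source over an adjacency dict; B drops the heap and the adjacency structure entirely and, per source, just re-relaxes the raw edge list in both directions until a full pass changes nothing (Bellman-Ford-style fixpoint), then picks the city with the fewest reachable neighbours within the threshold by a plain replace-on-tie scan.
import Mathlib
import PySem

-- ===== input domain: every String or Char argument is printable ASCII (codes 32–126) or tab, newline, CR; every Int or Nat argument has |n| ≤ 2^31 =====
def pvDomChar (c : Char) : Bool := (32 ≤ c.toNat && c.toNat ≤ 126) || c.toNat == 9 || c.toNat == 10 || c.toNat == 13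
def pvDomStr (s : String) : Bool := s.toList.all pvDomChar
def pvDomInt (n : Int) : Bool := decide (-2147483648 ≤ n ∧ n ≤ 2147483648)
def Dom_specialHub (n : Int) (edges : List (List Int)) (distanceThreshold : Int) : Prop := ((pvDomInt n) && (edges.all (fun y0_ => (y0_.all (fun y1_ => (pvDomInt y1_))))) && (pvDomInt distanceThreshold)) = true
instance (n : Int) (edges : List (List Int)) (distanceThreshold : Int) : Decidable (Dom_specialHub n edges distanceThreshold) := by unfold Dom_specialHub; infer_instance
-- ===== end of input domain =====

-- B replaces A's per-source heap-based (lazy) Dijkstra over an adjacency dict by plain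
-- repeated edge-list relaxation to a fixpoint per source (no heap, no adjacency structure);
-- same return value on all inputs admitted by Pre_, objective: simpler.

-- ===== PORT A =====
-- shared small helpers: Python list indexing d[v] / d[v] = x for vertex ints v with 0 ≤ v < len d
-- (exact there; Pre_ keeps every vertex in range), with `none` playing float('inf')
def pvGetO (d : List (Option Int)) (v : Int) : Option Int := d.getD v.toNat none
def pvSetO (d : List (Option Int)) (v : Int) (c : Int) : List (Option Int) := d.set v.toNat (some c)
-- termination measures (not part of the Python; used only by the totality guards below)
def pvInfC (d : List (Option Int)) : Nat := d.countP (fun x => x.isNone)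
def pvFinS (d : List (Option Int)) : Nat := (d.map (fun x => (x.map Int.toNat).getD 0)).sum
def pvLex2 (a b : Nat × Nat) : Bool := a.1 < b.1 || (a.1 == b.1 && a.2 < b.2)
def pvLex3 (a b : Nat × Nat × Nat) : Bool := a.1 < b.1 || (a.1 == b.1 && pvLex2 a.2 b.2)

-- graph = {i: [] for i in range(n)}
def pvGraphInit (n : Int) : PySem.Dict Int (List (Int × Int)) :=
  (PySem.List.pyRange 0 n 1).foldl (fun g i => g.insert i []) PySem.Dict.empty
-- graph[e1].append((e2, w)); graph[e2].append((e1, w)).  On a malformed row (length ≠ 3) or a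
-- missing key Python raises (ValueError/KeyError) — those inputs are excluded by Pre_; the
-- `_ => g` / getD-default branches are never reached under Pre_.
def pvGraphAdd (g : PySem.Dict Int (List (Int × Int))) (e : List Int) : PySem.Dict Int (List (Int × Int)) :=
  match e with
  | [u, v, w] =>
    let g1 := g.insert u (g.getD u [] ++ [(v, w)])
    g1.insert v (g1.getD v [] ++ [(u, w)])
  | _ => g
def pvBuildGraph (n : Int) (edges : List (List Int)) : PySem.Dict Int (List (Int × Int)) :=
  edges.foldl pvGraphAdd (pvGraphInit n)

-- heapq: only heappush/heappop are used, so the queue is a multiset of (dist, vertex) pairs;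
-- heappop returns the lexicographically least pair (equal pairs are identical tuples), which is
-- exactly: remove the first occurrence of the minimum.  heappush appends.
def pvPairLt (x y : Int × Int) : Bool := x.1 < y.1 || (x.1 == y.1 && x.2 < y.2)
def pvPopMin : List (Int × Int) → Option ((Int × Int) × List (Int × Int))
  | [] => none
  | h :: t =>
    let m := t.foldl (fun a x => if pvPairLt x a then x else a) h
    some (m, (h :: t).erase m)

-- the inner `for neighborcity, currweight in graph[currentvertex]` loop; `none` = inf, so
-- `totaldistance < inf` is true (the none branch)
def pvRelax (p : Int) (st : List (Option Int) × List (Int × Int)) (vw : Int × Int) :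
    List (Option Int) × List (Int × Int) :=
  let t := p + vw.2
  let doRelax : Bool := match pvGetO st.1 vw.1 with
    | none => true
    | some c => decide (t < c)
  if doRelax then (pvSetO st.1 vw.1 t, st.2 ++ [(t, vw.1)]) else st

lemma pvFoldMin_mem (l : List (Int × Int)) (a : Int × Int) :
    l.foldl (fun a x => if pvPairLt x a then x else a) a ∈ a :: l := by
  induction l generalizing a with
  | nil => simp
  | cons y ys ih =>
    simp only [List.foldl_cons]
    by_cases hy : pvPairLt y a
    · simp only [hy, if_pos]
      have := ih y
      simp only [List.mem_cons] at this ⊢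
      tauto
    · simp only [hy, Bool.false_eq_true, if_false]
      have := ih a
      simp only [List.mem_cons] at this ⊢
      tauto

lemma pvPopMin_some {q : List (Int × Int)} {x : Int × Int} {q' : List (Int × Int)}
    (h : pvPopMin q = some (x, q')) : x ∈ q ∧ q' = q.erase x := by
  match q with
  | [] => simp [pvPopMin] at h
  | h0 :: t =>
    simp only [pvPopMin, Option.some.injEq, Prod.mk.injEq] at h
    obtain ⟨hx, hq⟩ := h
    subst hx hq
    refine ⟨?_, rfl⟩
    have := pvFoldMin_mem t h0
    simp only [List.mem_cons] at this ⊢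
    tauto

lemma pvPopMin_len {q : List (Int × Int)} {x : Int × Int} {q' : List (Int × Int)}
    (h : pvPopMin q = some (x, q')) : q'.length < q.length := by
  obtain ⟨hm, he⟩ := pvPopMin_some h
  subst he
  rw [List.length_erase_of_mem hm]
  exact Nat.sub_lt (List.length_pos_of_mem hm) one_pos

-- the `while priorityqueue:` loop.  The dite guard is a totality guard only: under Pre_ it always
-- holds (proved below), so the loop runs exactly as the Python does; without Pre_ (negative
-- weights) the Python loop does not terminate.
def pvDijLoop (g : PySem.Dict Int (List (Int × Int))) (d : List (Option Int)) (q : List (Int × Int)) :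
    List (Option Int) :=
  match hpop : pvPopMin q with
  | none => d
  | some ((p, u), q') =>
    let skip : Bool := match pvGetO d u with
      | none => false
      | some c => decide (c < p)
    if skip then
      pvDijLoop g d q'
    else
      let st := (g.getD u []).foldl (pvRelax p) (d, [])
      if _h : pvLex3 (pvInfC st.1, pvFinS st.1, (q' ++ st.2).length) (pvInfC d, pvFinS d, q.length) = true then
        pvDijLoop g st.1 (q' ++ st.2)
      else st.1
  termination_by (pvInfC d, pvFinS d, q.length)
  decreasing_by
  · exact Prod.Lex.right _ (Prod.Lex.right _ (pvPopMin_len hpop))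
  · simp only [pvLex3, pvLex2, Bool.or_eq_true, decide_eq_true_eq, Bool.and_eq_true, beq_iff_eq] at _h
    rcases _h with h | ⟨h1, h | ⟨h2, h3⟩⟩
    · exact Prod.Lex.left _ _ h
    · rw [h1]; exact Prod.Lex.right _ (Prod.Lex.left _ _ h)
    · rw [h1, h2]; exact Prod.Lex.right _ (Prod.Lex.right _ h3)

-- sum(1 for dist in … if dist <= distanceThreshold and dist != 0): a 0/1-sum is a countP
def pvCount (th : Int) (dl : List (Option Int)) : Int :=
  (dl.countP (fun x => match x with
    | some c => decide (c ≤ th ∧ c ≠ 0)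
    | none => false) : Int)

def specialHub (n : Int) (edges : List (List Int)) (distanceThreshold : Int) : Int :=
  let g := pvBuildGraph n edges
  ((PySem.List.pyRange 0 n 1).foldl (fun (st : Option Int × Int) city =>
    let dl := pvDijLoop g ((List.replicate n.toNat (none : Option Int)).set city.toNat (some 0)) [(0, city)]
    let cnt := pvCount distanceThreshold dl
    match st.1 with
    | none => (some cnt, city)        -- nearbyCities < float('inf')
    | some L =>
      if cnt < L then (some cnt, city)
      else if cnt = L ∧ st.2 < city then (some L, city)
      else st) ((none : Option Int), -1)).2

-- ===== PORT B =====
-- one relaxation `if dist[a] is not None and (dist[b] is None or dist[a]+w < dist[b])`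
def pvRelaxE (st : List (Option Int) × Bool) (a b w : Int) : List (Option Int) × Bool :=
  match pvGetO st.1 a with
  | none => st
  | some da =>
    match pvGetO st.1 b with
    | none => (pvSetO st.1 b (da + w), true)
    | some db => if da + w < db then (pvSetO st.1 b (da + w), true) else st
-- one `for u, v, w in edges` pass (both directions); malformed rows are excluded by Pre_
def pvBFPass (edges : List (List Int)) (d : List (Option Int)) : List (Option Int) × Bool :=
  edges.foldl (fun st e =>
    match e with
    | [u, v, w] => pvRelaxE (pvRelaxE st u v w) v u w
    | _ => st) (d, false)
-- the `while changed:` loop; the dite is a totality guard that always holds under Pre_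
def pvBFLoop (edges : List (List Int)) (d : List (Option Int)) : List (Option Int) :=
  let st := pvBFPass edges d
  if st.2 then
    if _h : pvLex2 (pvInfC st.1, pvFinS st.1) (pvInfC d, pvFinS d) = true then pvBFLoop edges st.1
    else st.1
  else st.1
  termination_by (pvInfC d, pvFinS d)
  decreasing_by
    simp only [pvLex2, Bool.or_eq_true, decide_eq_true_eq, Bool.and_eq_true, beq_iff_eq] at _h
    rcases _h with h | ⟨h1, h2⟩
    · exact Prod.Lex.left _ _ h
    · rw [h1]; exact Prod.Lex.right _ h2

def specialHub_alt (n : Int) (edges : List (List Int)) (distanceThreshold : Int) : Int :=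
  ((PySem.List.pyRange 0 n 1).foldl (fun (st : Option Int × Int) s =>
    let dl := pvBFLoop edges ((List.replicate n.toNat (none : Option Int)).set s.toNat (some 0))
    let cnt := pvCount distanceThreshold dl
    match st.1 with
    | none => (some cnt, s)
    | some b => if cnt ≤ b then (some cnt, s) else st) ((none : Option Int), -1)).2

-- ===== PRECONDITION & SPEC =====
def pvOkRow (n : Int) (e : List Int) : Bool :=
  match e with
  | [u, v, w] => decide (0 ≤ u) && decide (u < n) && decide (0 ≤ v) && decide (v < n) && decide (0 ≤ w)
  | _ => false
-- Pre_ excludes exactly the inputs on which A does not return: a row that is not [u, v, w] with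
-- 0 ≤ u, v < n raises (ValueError on unpacking / KeyError on the dict), and a negative edge
-- weight puts a negative cycle in the undirected graph, on which A's Dijkstra loop never ends.
def Pre_specialHub (n : Int) (edges : List (List Int)) (distanceThreshold : Int) : Prop :=
  edges.all (pvOkRow n) = true
instance (n : Int) (edges : List (List Int)) (distanceThreshold : Int) : Decidable (Pre_specialHub n edges distanceThreshold) := by unfold Pre_specialHub; infer_instance
def pvWitness_specialHub : Int × List (List Int) × Int := (4, [[0, 1, 3], [1, 2, 1], [1, 3, 4], [2, 3, 1]], 4)
def Spec_specialHub (n : Int) (edges : List (List Int)) (distanceThreshold : Int) (out : Int) : Prop := out = specialHub_alt n edges distanceThreshold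
instance (n : Int) (edges : List (List Int)) (distanceThreshold : Int) (out : Int) : Decidable (Spec_specialHub n edges distanceThreshold out) := by unfold Spec_specialHub; infer_instance

-- ===== CLAIM (what is proved, stated in full; the proofs are below) =====
def Claim_equal_specialHub : Prop := ∀ (n : Int) (edges : List (List Int)) (distanceThreshold : Int), Dom_specialHub n edges distanceThreshold → Pre_specialHub n edges distanceThreshold → Spec_specialHub n edges distanceThreshold (specialHub n edges distanceThreshold)

-- ===== LEMMAS AND PROOFS =====

-- abbreviation for reading distance i of the array (getD, so out of range = none)
def pvD (d : List (Option Int)) (i : Nat) : Option Int := d.getD i none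

-- the symmetric edge relation of the input graph
def pvSymE (edges : List (List Int)) (u v w : Int) : Prop := [u, v, w] ∈ edges ∨ [v, u, w] ∈ edges

-- walks from s and their exact costs
inductive pvConn (edges : List (List Int)) (s : Int) : Int → Int → Prop
  | refl : pvConn edges s s 0
  | step {u v w c} : pvConn edges s u c → pvSymE edges u v w → pvConn edges s v (c + w)

-- the characterisation both loops are proved to satisfy: distance array of source s
def pvGoodD (n : Int) (edges : List (List Int)) (s : Int) (d : List (Option Int)) : Prop :=
  d.length = n.toNat ∧
  pvD d s.toNat = some 0 ∧
  (∀ u v w, pvSymE edges u v w → ∀ cu, pvD d u.toNat = some cu →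
      ∃ cv, pvD d v.toNat = some cv ∧ cv ≤ cu + w) ∧
  (∀ i : Nat, ∀ c, pvD d i = some c → pvConn edges s (i : Int) c)

def pvRowsOk (n : Int) (edges : List (List Int)) : Prop := ∀ e ∈ edges, pvOkRow n e = true

def pvAdjL (n : Int) (edges : List (List Int)) (u : Int) : List (Int × Int) :=
  (pvBuildGraph n edges).getD u []

-- loop invariant of A's Dijkstra
def pvInvA (n : Int) (edges : List (List Int)) (s : Int) (d : List (Option Int)) (q : List (Int × Int)) : Prop :=
  d.length = n.toNat ∧
  pvD d s.toNat = some 0 ∧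
  (∀ i c, pvD d i = some c → 0 ≤ c) ∧
  (∀ i c, pvD d i = some c → pvConn edges s (i : Int) c) ∧
  (∀ pu ∈ q, 0 ≤ pu.2 ∧ pu.2 < n ∧ ∃ c, pvD d pu.2.toNat = some c ∧ c ≤ pu.1) ∧
  (∀ i c, pvD d i = some c →
    ((c, (i : Int)) ∈ q ∨
      ∀ vw ∈ pvAdjL n edges (i : Int), ∃ cv, pvD d vw.1.toNat = some cv ∧ cv ≤ c + vw.2))

-- loop invariant of B's relaxation
def pvInvB (n : Int) (edges : List (List Int)) (s : Int) (d : List (Option Int)) : Prop :=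
  d.length = n.toNat ∧
  pvD d s.toNat = some 0 ∧
  (∀ i c, pvD d i = some c → 0 ≤ c) ∧
  (∀ i c, pvD d i = some c → pvConn edges s (i : Int) c)

-- ---- helper facts about pvD / set ----
lemma pvD_set_self {d : List (Option Int)} {i : Nat} (hi : i < d.length) (x : Option Int) :
    pvD (d.set i x) i = x := by
  unfold pvD
  rw [List.getD_eq_getElem?_getD, List.getElem?_set_self hi]
  cases x <;> simp

lemma pvD_set_ne {d : List (Option Int)} {i i0 : Nat} (hne : i0 ≠ i) (x : Option Int) :
    pvD (d.set i x) i0 = pvD d i0 := by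
  unfold pvD
  rw [List.getD_eq_getElem?_getD, List.getD_eq_getElem?_getD, List.getElem?_set_ne (by omega)]

-- ---- uniqueness of a Good array ----
lemma pvGood_le {n : Int} {edges : List (List Int)} {s : Int} {d : List (Option Int)}
    (h : pvGoodD n edges s d) :
    ∀ v c, pvConn edges s v c → ∃ c', pvD d v.toNat = some c' ∧ c' ≤ c := by
  intro v c hc
  induction hc with
  | refl => exact ⟨0, h.2.1, le_refl 0⟩
  | step hc he ih =>
    obtain ⟨c', hd, hle⟩ := ih
    obtain ⟨cv, hdv, hlev⟩ := h.2.2.1 _ _ _ he _ hd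
    exact ⟨cv, hdv, by omega⟩

lemma pvGood_unique {n : Int} {edges : List (List Int)} {s : Int} {d1 d2 : List (Option Int)}
    (h1 : pvGoodD n edges s d1) (h2 : pvGoodD n edges s d2) : d1 = d2 := by
  have key : ∀ i : Nat, pvD d1 i = pvD d2 i := by
    intro i
    have dir : ∀ (da db : List (Option Int)), pvGoodD n edges s da → pvGoodD n edges s db →
        ∀ c, pvD da i = some c → ∃ c', pvD db i = some c' ∧ c' ≤ c := by
      intro da db hda hdb c hc
      have hconn := hda.2.2.2 i c hc
      have := pvGood_le hdb _ _ hconn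
      simpa using this
    cases hc1 : pvD d1 i with
    | none =>
      cases hc2 : pvD d2 i with
      | none => rfl
      | some c2 =>
        obtain ⟨c', hc', _⟩ := dir d2 d1 h2 h1 c2 hc2
        rw [hc1] at hc'; cases hc'
    | some c1 =>
      obtain ⟨c2, hc2, hle2⟩ := dir d1 d2 h1 h2 c1 hc1
      obtain ⟨c1', hc1', hle1⟩ := dir d2 d1 h2 h1 c2 hc2
      rw [hc1] at hc1'
      cases hc1'
      rw [hc2]
      congr 1
      omega
  have hlen : d1.length = d2.length := by rw [h1.1, h2.1]
  apply List.ext_getElem hlen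
  intro i hi1 hi2
  have := key i
  unfold pvD at this
  rwa [List.getD_eq_getElem?_getD, List.getD_eq_getElem?_getD, List.getElem?_eq_getElem hi1,
    List.getElem?_eq_getElem hi2, Option.getD_some, Option.getD_some] at this

-- ---- adjacency characterisation ----
lemma pvSymE_bounds {n : Int} {edges : List (List Int)} (hok : pvRowsOk n edges)
    {u v w : Int} (h : pvSymE edges u v w) :
    0 ≤ u ∧ u < n ∧ 0 ≤ v ∧ v < n ∧ 0 ≤ w := by
  rcases h with h | h <;>
  · have := hok _ h
    simp only [pvOkRow, Bool.and_eq_true, decide_eq_true_eq] at this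
    tauto

lemma pvGraphInit_getD (n : Int) (u : Int) : (pvGraphInit n).getD u [] = [] := by
  unfold pvGraphInit
  have : ∀ (l : List Int) (g : PySem.Dict Int (List (Int × Int))),
      (∀ x, g.getD x [] = []) → ∀ x, (l.foldl (fun g i => g.insert i []) g).getD x [] = [] := by
    intro l
    induction l with
    | nil => intro g hg x; exact hg x
    | cons y ys ih =>
      intro g hg x
      simp only [List.foldl_cons]
      apply ih
      intro z
      rw [PySem.Dict.getD_insert]
      split <;> simp [hg]
  exact this _ _ (fun x => PySem.Dict.getD_empty _ _) u

lemma pvGraphAdd_getD (g : PySem.Dict Int (List (Int × Int))) (u v w : Int) (x : Int) (vw : Int × Int) :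
    vw ∈ (pvGraphAdd g [u, v, w]).getD x [] ↔
      vw ∈ g.getD x [] ∨ (x = u ∧ vw = (v, w)) ∨ (x = v ∧ vw = (u, w)) := by
  show vw ∈ ((g.insert u (g.getD u [] ++ [(v, w)])).insert v
      ((g.insert u (g.getD u [] ++ [(v, w)])).getD v [] ++ [(u, w)])).getD x [] ↔ _
  rw [PySem.Dict.getD_insert]
  by_cases hxv : x = v
  · subst hxv
    rw [if_pos rfl, PySem.Dict.getD_insert]
    by_cases hxu : x = u
    · subst hxu
      simp [List.mem_append]
      try tauto
    · rw [if_neg hxu]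
      simp [List.mem_append]
      try tauto
  · rw [if_neg hxv, PySem.Dict.getD_insert]
    by_cases hxu : x = u
    · subst hxu
      rw [if_pos rfl]
      simp [List.mem_append]
      try tauto
    · rw [if_neg hxu]
      tauto

lemma pvSymE_cons (r : List Int) (es : List (List Int)) (x a b : Int) :
    pvSymE (r :: es) x a b ↔ pvSymE es x a b ∨ r = [x, a, b] ∨ r = [a, x, b] := by
  simp only [pvSymE, List.mem_cons]
  tauto

lemma pvAdj_iff {n : Int} {edges : List (List Int)} (hok : pvRowsOk n edges)
    {u : Int} (vw : Int × Int) :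
    vw ∈ pvAdjL n edges u ↔ pvSymE edges u vw.1 vw.2 := by
  unfold pvAdjL pvBuildGraph
  have main : ∀ (es : List (List Int)) (g : PySem.Dict Int (List (Int × Int))),
      (∀ e ∈ es, pvOkRow n e = true) →
      ∀ (x : Int) (vw : Int × Int),
      (vw ∈ (es.foldl pvGraphAdd g).getD x [] ↔ vw ∈ g.getD x [] ∨ pvSymE es x vw.1 vw.2) := by
    intro es
    induction es with
    | nil => intro g _ x vw; simp [pvSymE]
    | cons r rs ih =>
      intro g hok x vw
      have hr := hok r (by simp)
      match r, hr with
      | [a, b, c], _ =>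
        simp only [List.foldl_cons]
        rw [ih _ (fun e he => hok e (by simp [he])) x vw]
        rw [pvGraphAdd_getD]
        rw [pvSymE_cons]
        obtain ⟨p, q⟩ := vw
        simp only [List.cons.injEq, Prod.mk.injEq, and_true]
        constructor
        · rintro ((h | ⟨hx, hp, hq⟩ | ⟨hx, hp, hq⟩) | h)
          · exact Or.inl h
          · exact Or.inr (Or.inr (Or.inl ⟨hx.symm, hp.symm, hq.symm⟩))
          · exact Or.inr (Or.inr (Or.inr ⟨hp.symm, hx.symm, hq.symm⟩))
          · exact Or.inr (Or.inl h)
        · rintro (h | h | ⟨ha, hb, hc⟩ | ⟨ha, hb, hc⟩)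
          · exact Or.inl (Or.inl h)
          · exact Or.inr h
          · exact Or.inl (Or.inr (Or.inl ⟨ha.symm, hb.symm, hc.symm⟩))
          · exact Or.inl (Or.inr (Or.inr ⟨hb.symm, ha.symm, hc.symm⟩))
  rw [main edges (pvGraphInit n) hok u vw]
  rw [pvGraphInit_getD]
  simp

-- ---- measure lemmas for single set ----
lemma pvSet_measure_none {d : List (Option Int)} {i : Nat} (hi : i < d.length)
    (h : pvD d i = none) (t : Int) :
    pvInfC (d.set i (some t)) < pvInfC d := by
  induction d generalizing i with
  | nil => simp at hi
  | cons x xs ih =>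
    cases i with
    | zero =>
      unfold pvD at h; simp at h
      simp [pvInfC, h]
    | succ j =>
      have hj : j < xs.length := by simpa using hi
      have := ih hj (by simpa [pvD] using h)
      simp only [List.set_cons_succ, pvInfC, List.countP_cons] at *
      omega

lemma pvSet_measure_some {d : List (Option Int)} {i : Nat} {c t : Int}
    (h : pvD d i = some c) (ht : 0 ≤ t) (hlt : t < c) :
    pvInfC (d.set i (some t)) = pvInfC d ∧ pvFinS (d.set i (some t)) < pvFinS d := by
  induction d generalizing i with
  | nil => simp [pvD] at h
  | cons x xs ih =>
    cases i with
    | zero =>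
      unfold pvD at h; simp at h
      subst h
      constructor
      · simp [pvInfC]
      · simp only [List.set_cons_zero, pvFinS, List.map_cons, List.sum_cons]
        have : t.toNat < c.toNat := by omega
        simp only [Option.map_some, Option.getD_some]
        omega
    | succ j =>
      have := ih (by simpa [pvD] using h)
      simp only [List.set_cons_succ, pvInfC, pvFinS, List.countP_cons, List.map_cons, List.sum_cons] at *
      omega

-- strict lexicographic measure decrease is transitive and closed under further steps
lemma pvLex2_trans {a b c : Nat × Nat} (h1 : pvLex2 a b = true) (h2 : pvLex2 b c = true) :
    pvLex2 a c = true := by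
  simp only [pvLex2, Bool.or_eq_true, decide_eq_true_eq, Bool.and_eq_true, beq_iff_eq] at *
  omega

-- ---- A-side relax fold lemma ----
lemma pvRelaxFold
    {n : Int} {edges : List (List Int)} {s p u : Int} {d : List (Option Int)} {nbrs : List (Int × Int)}
    (hb : ∀ vw ∈ nbrs, 0 ≤ vw.1 ∧ vw.1 < n ∧ 0 ≤ vw.2 ∧ pvSymE edges u vw.1 vw.2)
    (hlen : d.length = n.toNat)
    (hp : 0 ≤ p)
    (hu : pvConn edges s u p)
    (hnn : ∀ i c, pvD d i = some c → 0 ≤ c)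
    (hre : ∀ i c, pvD d i = some c → pvConn edges s (i : Int) c) :
    ∀ acc : List (Int × Int),
    let st := nbrs.foldl (pvRelax p) (d, acc)
    st.1.length = d.length ∧
    (∀ i c, pvD d i = some c → ∃ c', pvD st.1 i = some c' ∧ c' ≤ c) ∧
    (∀ i c, pvD st.1 i = some c → 0 ≤ c) ∧
    (∀ i c, pvD st.1 i = some c → pvConn edges s (i : Int) c) ∧
    (∀ i, pvD st.1 i = pvD d i ∨ ∃ c, pvD st.1 i = some c ∧ (c, (i : Int)) ∈ st.2) ∧
    (∀ vw ∈ nbrs, ∃ cv, pvD st.1 vw.1.toNat = some cv ∧ cv ≤ p + vw.2) ∧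
    (∀ tx ∈ st.2, tx ∈ acc ∨ (0 ≤ tx.2 ∧ tx.2 < n ∧ ∃ c, pvD st.1 tx.2.toNat = some c ∧ c ≤ tx.1)) ∧
    (∀ y ∈ acc, y ∈ st.2) ∧
    ((st.1 = d ∧ st.2 = acc) ∨ pvLex2 (pvInfC st.1, pvFinS st.1) (pvInfC d, pvFinS d) = true) := by
  induction nbrs generalizing d with
  | nil =>
    intro acc
    refine ⟨rfl, fun i c h => ⟨c, h, le_refl c⟩, hnn, hre, fun i => Or.inl rfl, by simp,
      fun tx htx => Or.inl htx, fun y hy => hy, Or.inl ⟨rfl, rfl⟩⟩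
  | cons vw rest ih =>
    intro acc
    obtain ⟨hv0, hvn, hw0, hsym⟩ := hb vw (by simp)
    have hb' : ∀ x ∈ rest, 0 ≤ x.1 ∧ x.1 < n ∧ 0 ≤ x.2 ∧ pvSymE edges u x.1 x.2 :=
      fun x hx => hb x (by simp [hx])
    simp only [List.foldl_cons]
    by_cases hrel : (match pvGetO d vw.1 with
      | none => true
      | some c => decide (p + vw.2 < c)) = true
    · -- relaxation fires
      have hstep : pvRelax p (d, acc) vw =
          (d.set vw.1.toNat (some (p + vw.2)), acc ++ [(p + vw.2, vw.1)]) := by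
        unfold pvRelax pvSetO
        simp only [hrel, if_pos]
      rw [hstep]
      set t := p + vw.2 with ht
      set d' := d.set vw.1.toNat (some t) with hd'
      set i := vw.1.toNat with hi
      have hiLen : i < d.length := by
        rw [hlen]; omega
      have hDi : pvD d' i = some t := pvD_set_self hiLen _
      have hDne : ∀ i0, i0 ≠ i → pvD d' i0 = pvD d i0 := fun i0 h0 => pvD_set_ne h0 _
      have hvi : ((i : Nat) : Int) = vw.1 := by omega
      have ht0 : 0 ≤ t := by omega
      have hnn' : ∀ i0 c, pvD d' i0 = some c → 0 ≤ c := by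
        intro i0 c h0
        by_cases he : i0 = i
        · subst he; rw [hDi] at h0; cases h0; exact ht0
        · exact hnn i0 c (by rwa [hDne i0 he] at h0)
      have hre' : ∀ i0 c, pvD d' i0 = some c → pvConn edges s (i0 : Int) c := by
        intro i0 c h0
        by_cases he : i0 = i
        · subst he; rw [hDi] at h0; cases h0; rw [hvi]; exact pvConn.step hu hsym
        · exact hre i0 c (by rwa [hDne i0 he] at h0)
      have hlex : pvLex2 (pvInfC d', pvFinS d') (pvInfC d, pvFinS d) = true := by
        rcases hcase : pvGetO d vw.1 with _ | c
        · have h0 : pvD d i = none := hcase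
          have h1 := pvSet_measure_none hiLen h0 t
          rw [← hd'] at h1
          simp only [pvLex2, Bool.or_eq_true, decide_eq_true_eq]
          left; exact h1
        · have hc : pvD d i = some c := hcase
          have htc : t < c := by
            rw [hcase] at hrel; simpa using hrel
          have h1 := pvSet_measure_some hc ht0 htc
          rw [← hd'] at h1
          simp only [pvLex2, Bool.or_eq_true, decide_eq_true_eq, Bool.and_eq_true, beq_iff_eq]
          right; exact ⟨h1.1, h1.2⟩
      have hDec' : ∀ i0 c, pvD d i0 = some c → ∃ c', pvD d' i0 = some c' ∧ c' ≤ c := by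
        intro i0 c h0
        by_cases he : i0 = i
        · subst he
          refine ⟨t, hDi, ?_⟩
          rcases hcase : pvGetO d vw.1 with _ | c2
          · have : pvD d i = none := hcase
            rw [this] at h0; cases h0
          · have hc2 : pvD d i = some c2 := hcase
            rw [hc2] at h0; cases h0
            rw [hcase] at hrel
            have : t < c := by simpa using hrel
            omega
        · exact ⟨c, by rwa [hDne i0 he], le_refl c⟩
      obtain ⟨c1, c2, c3, c4, c5, c6, c7, c0, c8⟩ :=
        ih hb' (by simp [hd', hlen]) hnn' hre' (acc ++ [(t, vw.1)])
      set st := rest.foldl (pvRelax p) (d', acc ++ [(t, vw.1)]) with hst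
      refine ⟨by rw [c1, hd']; simp, ?_, c3, c4, ?_, ?_, ?_, ?_, ?_⟩
      · intro i0 c h0
        obtain ⟨c', h', hle'⟩ := hDec' i0 c h0
        obtain ⟨c'', h'', hle''⟩ := c2 i0 c' h'
        exact ⟨c'', h'', by omega⟩
      · intro i0
        rcases c5 i0 with h0 | ⟨c, hc, hmem⟩
        · by_cases he : i0 = i
          · subst he
            right
            refine ⟨t, by rw [h0]; exact hDi, ?_⟩
            rw [hvi]
            exact c0 (t, vw.1) (List.mem_append.2 (Or.inr (by simp)))
          · left; rw [h0]; exact hDne i0 he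
        · right; exact ⟨c, hc, hmem⟩
      · intro x hx
        rcases List.mem_cons.1 hx with he | hx'
        · subst he
          obtain ⟨c'', h'', hle''⟩ := c2 i t hDi
          exact ⟨c'', h'', by omega⟩
        · exact c6 x hx'
      · intro tx htx
        rcases c7 tx htx with hin | hgood
        · rcases List.mem_append.1 hin with h0 | h0
          · exact Or.inl h0
          · simp only [List.mem_singleton] at h0
            subst h0
            right
            refine ⟨hv0, hvn, ?_⟩
            obtain ⟨c'', h'', hle''⟩ := c2 i t hDi
            refine ⟨c'', ?_, hle''⟩
            show pvD st.1 ((vw.1).toNat) = some c''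
            exact h''
        · exact Or.inr hgood
      · intro y hy
        exact c0 y (List.mem_append.2 (Or.inl hy))
      · right
        rcases c8 with ⟨hde, _⟩ | hlex'
        · rw [hde]; exact hlex
        · exact pvLex2_trans hlex' hlex
    · -- no relaxation
      have hstep : pvRelax p (d, acc) vw = (d, acc) := by
        unfold pvRelax
        simp only [Bool.not_eq_true] at hrel
        simp [hrel]
      rw [hstep]
      obtain ⟨c1, c2, c3, c4, c5, c6, c7, c0, c8⟩ := ih hb' hlen hnn hre acc
      refine ⟨c1, c2, c3, c4, c5, ?_, c7, c0, c8⟩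
      intro x hx
      rcases List.mem_cons.1 hx with he | hx'
      · subst he
        rcases hcase : pvGetO d x.1 with _ | c
        · exfalso; apply hrel; rw [hcase]
        · have hc : pvD d x.1.toNat = some c := hcase
          have hcle : c ≤ p + x.2 := by
            rw [hcase] at hrel
            simp only [decide_eq_true_eq] at hrel
            omega
          obtain ⟨c'', h'', hle''⟩ := c2 x.1.toNat c hc
          exact ⟨c'', h'', by omega⟩
      · exact c6 x hx'


-- ---- A's loop establishes Good ----
lemma pvDijLoop_good {n : Int} {edges : List (List Int)} {s : Int}
    (hok : pvRowsOk n edges) :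
    ∀ d q, pvInvA n edges s d q → pvGoodD n edges s (pvDijLoop (pvBuildGraph n edges) d q) := by
  intro d q
  induction d, q using pvDijLoop.induct (g := pvBuildGraph n edges) with
  | case1 d q hpop =>
    intro hinv
    obtain ⟨hlen, hs0, hnn, hre, hK, hJ⟩ := hinv
    have hqnil : q = [] := by
      cases q with
      | nil => rfl
      | cons a t => simp [pvPopMin] at hpop
    rw [pvDijLoop, hpop]
    refine ⟨hlen, hs0, ?_, fun i c h => hre i c h⟩
    intro u v w hsym cu hcu
    obtain ⟨hu0, hun, hv0, hvn, hw0⟩ := pvSymE_bounds hok hsym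
    have hui : ((u.toNat : Nat) : Int) = u := by omega
    rcases hJ u.toNat cu hcu with hw | hstab
    · rw [hqnil] at hw; simp at hw
    · have hadj : (v, w) ∈ pvAdjL n edges ((u.toNat : Nat) : Int) := by
        rw [hui]
        exact (pvAdj_iff hok (v, w)).2 hsym
      obtain ⟨cv, hdv, hle⟩ := hstab (v, w) hadj
      exact ⟨cv, hdv, hle⟩
  | case2 d q p u q' hpop skipv hskip ih1 =>
    intro hinv
    obtain ⟨hlen, hs0, hnn, hre, hK, hJ⟩ := hinv
    obtain ⟨hmemq, herase⟩ := pvPopMin_some hpop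
    have hsk : (match pvGetO d u with
      | none => false
      | some c => decide (c < p)) = true := hskip
    rcases hgo : pvGetO d u with _ | c
    · rw [hgo] at hsk; simp at hsk
    · rw [hgo] at hsk
      have hcp : c < p := by simpa using hsk
      have hinv' : pvInvA n edges s d q' := by
        refine ⟨hlen, hs0, hnn, hre, ?_, ?_⟩
        · intro pu hpu
          exact hK pu (List.mem_of_mem_erase (herase ▸ hpu))
        · intro i c0 hci
          rcases hJ i c0 hci with hw | hstab
          · left
            rw [herase]
            apply List.mem_erase_of_ne ?_ |>.2 hw
            intro hcontra
            have h1 : c0 = p := congrArg Prod.fst hcontra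
            have h2 : (i : Int) = u := congrArg Prod.snd hcontra
            have hiu : i = u.toNat := by omega
            rw [hiu] at hci
            have : pvD d u.toNat = some c := hgo
            rw [this] at hci
            cases hci
            omega
          · right; exact hstab
      rw [pvDijLoop, hpop]
      simp only [hgo]
      rw [if_pos (by simpa using hcp)]
      exact ih1 hinv'
  | case3 d q p u q' hpop skipv hns stv hguard ih1 =>
    intro hinv
    obtain ⟨hlen, hs0, hnn, hre, hK, hJ⟩ := hinv
    obtain ⟨hmemq, herase⟩ := pvPopMin_some hpop
    obtain ⟨hu0, hun, c0, hc0, hc0le⟩ := hK (p, u) hmemq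
    rcases hgo : pvGetO d u with _ | c
    · exact absurd (show pvD d u.toNat = some c0 from hc0) (by rw [show pvD d u.toNat = pvGetO d u from rfl, hgo]; simp)
    · have hceq : (pvD d u.toNat : Option Int) = some c := hgo
      rw [hceq] at hc0
      cases hc0
      have hcp : ¬ c0 < p := by
        intro hlt
        apply hns
        show (match pvGetO d u with
          | none => false
          | some c => decide (c < p)) = true
        rw [hgo]
        simpa using hlt
      have hcpeq : c0 = p := by omega
      subst hcpeq
      have hui : ((u.toNat : Nat) : Int) = u := by omega
      have hb : ∀ vw ∈ pvAdjL n edges u, 0 ≤ vw.1 ∧ vw.1 < n ∧ 0 ≤ vw.2 ∧ pvSymE edges u vw.1 vw.2 := by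
        intro vw hvw
        have hsym := (pvAdj_iff hok vw).1 hvw
        obtain ⟨_, _, h1, h2, h3⟩ := pvSymE_bounds hok hsym
        exact ⟨h1, h2, h3, hsym⟩
      have hp0 : 0 ≤ c0 := hnn u.toNat c0 hceq
      have huconn : pvConn edges s u c0 := by
        have := hre u.toNat c0 hceq
        rwa [hui] at this
      obtain ⟨c1, c2, c3, c4, c5, c6, c7, cmon, c8⟩ :=
        pvRelaxFold hb hlen hp0 huconn hnn hre ([] : List (Int × Int))
      have hstv : stv = List.foldl (pvRelax c0) (d, ([] : List (Int × Int))) (pvAdjL n edges u) := rfl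
      set st := List.foldl (pvRelax c0) (d, ([] : List (Int × Int))) (pvAdjL n edges u) with hst
      have hinv' : pvInvA n edges s st.1 (q' ++ st.2) := by
        refine ⟨c1.trans hlen, ?_, c3, c4, ?_, ?_⟩
        · obtain ⟨c', hc', hle'⟩ := c2 s.toNat 0 hs0
          have := c3 s.toNat c' hc'
          have : c' = 0 := by omega
          rwa [this] at hc'
        · intro pu hpu
          rcases List.mem_append.1 hpu with hq | hpush
          · obtain ⟨b1, b2, cc, hcc, hccle⟩ := hK pu (List.mem_of_mem_erase (herase ▸ hq))
            obtain ⟨cc', hcc', hccle'⟩ := c2 pu.2.toNat cc hcc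
            exact ⟨b1, b2, cc', hcc', by omega⟩
          · rcases c7 pu hpush with hnil | hgood
            · simp at hnil
            · exact hgood
        · intro i cc hci
          rcases c5 i with hsame | ⟨cc', hcc', hmem⟩
          · rw [hsame] at hci
            rcases hJ i cc hci with hw | hstab
            · by_cases hcontra : (cc, (i : Int)) = (c0, u)
              · have h1 : cc = c0 := congrArg Prod.fst hcontra
                have h2 : (i : Int) = u := congrArg Prod.snd hcontra
                right
                intro vw hvw
                rw [h2] at hvw
                obtain ⟨cv, hdv, hle⟩ := c6 vw hvw
                exact ⟨cv, hdv, by omega⟩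
              · left
                apply List.mem_append.2
                left
                rw [herase]
                exact (List.mem_erase_of_ne hcontra).2 hw
            · right
              intro vw hvw
              obtain ⟨cv, hdv, hle⟩ := hstab vw hvw
              obtain ⟨cv', hdv', hle'⟩ := c2 vw.1.toNat cv hdv
              exact ⟨cv', hdv', by omega⟩
          · rw [hcc'] at hci
            cases hci
            left
            exact List.mem_append.2 (Or.inr hmem)
      rw [pvDijLoop, hpop]
      simp only [hgo]
      rw [if_neg (by simpa using hcp)]
      rw [dif_pos hguard]
      apply ih1
      rw [hstv]
      exact hinv'
  | case4 d q p u q' hpop skipv hns stv hguard =>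
    intro hinv
    exfalso
    apply hguard
    obtain ⟨hlen, hs0, hnn, hre, hK, hJ⟩ := hinv
    obtain ⟨hmemq, herase⟩ := pvPopMin_some hpop
    obtain ⟨hu0, hun, c0, hc0, hc0le⟩ := hK (p, u) hmemq
    rcases hgo : pvGetO d u with _ | c
    · exact absurd (show pvD d u.toNat = some c0 from hc0) (by rw [show pvD d u.toNat = pvGetO d u from rfl, hgo]; simp)
    · have hceq : (pvD d u.toNat : Option Int) = some c := hgo
      rw [hceq] at hc0
      cases hc0
      have hcp : ¬ c0 < p := by
        intro hlt
        apply hns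
        show (match pvGetO d u with
          | none => false
          | some c => decide (c < p)) = true
        rw [hgo]
        simpa using hlt
      have hcpeq : c0 = p := by omega
      subst hcpeq
      have hui : ((u.toNat : Nat) : Int) = u := by omega
      have hb : ∀ vw ∈ pvAdjL n edges u, 0 ≤ vw.1 ∧ vw.1 < n ∧ 0 ≤ vw.2 ∧ pvSymE edges u vw.1 vw.2 := by
        intro vw hvw
        have hsym := (pvAdj_iff hok vw).1 hvw
        obtain ⟨_, _, h1, h2, h3⟩ := pvSymE_bounds hok hsym
        exact ⟨h1, h2, h3, hsym⟩
      have hp0 : 0 ≤ c0 := hnn u.toNat c0 hceq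
      have huconn : pvConn edges s u c0 := by
        have := hre u.toNat c0 hceq
        rwa [hui] at this
      obtain ⟨c1, c2, c3, c4, c5, c6, c7, cmon, c8⟩ :=
        pvRelaxFold hb hlen hp0 huconn hnn hre ([] : List (Int × Int))
      have hstv : stv = List.foldl (pvRelax c0) (d, ([] : List (Int × Int))) (pvAdjL n edges u) := rfl
      rw [hstv]
      rcases c8 with ⟨hde, hpe⟩ | hlex
      · have hql : q'.length < q.length := pvPopMin_len hpop
        simp only [pvLex3, pvLex2, hde, hpe, Bool.or_eq_true, decide_eq_true_eq,
          Bool.and_eq_true, beq_iff_eq, List.append_nil]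
        exact Or.inr ⟨trivial, Or.inr ⟨trivial, hql⟩⟩
      · simp only [pvLex3, pvLex2, Bool.or_eq_true, decide_eq_true_eq,
          Bool.and_eq_true, beq_iff_eq] at hlex ⊢
        tauto

-- ---- B-side pass lemma ----
lemma pvSymE_swap {edges : List (List Int)} {u v w : Int} (h : pvSymE edges u v w) :
    pvSymE edges v u w := by
  unfold pvSymE at *; tauto

lemma pvRelaxE_spec {n : Int} {edges : List (List Int)} {s : Int}
    (st : List (Option Int) × Bool) (a b w : Int)
    (ha0 : 0 ≤ a) (hb0 : 0 ≤ b) (hbn : b < n) (hw : 0 ≤ w)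
    (hsym : pvSymE edges a b w)
    (hinv : pvInvB n edges s st.1) :
    pvInvB n edges s (pvRelaxE st a b w).1 ∧
    (∀ i c, pvD st.1 i = some c → ∃ c', pvD (pvRelaxE st a b w).1 i = some c' ∧ c' ≤ c) ∧
    (pvRelaxE st a b w = st ∨
      (pvLex2 (pvInfC (pvRelaxE st a b w).1, pvFinS (pvRelaxE st a b w).1) (pvInfC st.1, pvFinS st.1) = true ∧
        (pvRelaxE st a b w).2 = true)) ∧
    ((pvRelaxE st a b w).2 = false → pvRelaxE st a b w = st ∧
      ∀ da, pvD st.1 a.toNat = some da → ∃ db, pvD st.1 b.toNat = some db ∧ db ≤ da + w) := by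
  obtain ⟨hlen, hs0, hnn, hre⟩ := hinv
  have hblen : b.toNat < st.1.length := by rw [hlen]; omega
  rcases hga : pvGetO st.1 a with _ | da
  · have hre1 : pvRelaxE st a b w = st := by unfold pvRelaxE; rw [hga]
    rw [hre1]
    refine ⟨⟨hlen, hs0, hnn, hre⟩, fun i c h => ⟨c, h, le_refl c⟩, Or.inl rfl, fun _ => ⟨rfl, ?_⟩⟩
    intro da hda
    rw [show pvD st.1 a.toNat = pvGetO st.1 a from rfl, hga] at hda
    cases hda
  · have hda : pvD st.1 a.toNat = some da := hga
    have ht0 : 0 ≤ da + w := by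
      have := hnn a.toNat da hda
      omega
    have hconnb : pvConn edges s b (da + w) := by
      have h1 := hre a.toNat da hda
      have h2 : ((a.toNat : Nat) : Int) = a := by omega
      rw [h2] at h1
      exact pvConn.step h1 hsym
    have hset : ∀ t : Int, 0 ≤ t → pvConn edges s b t →
        (pvD st.1 b.toNat = none ∨ ∃ db, pvD st.1 b.toNat = some db ∧ t < db) →
        pvInvB n edges s (st.1.set b.toNat (some t)) := by
      intro t ht hc hless
      refine ⟨by simp [hlen], ?_, ?_, ?_⟩
      · by_cases hbs : b.toNat = s.toNat
        · exfalso
          rw [hbs] at hless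
          rcases hless with h | ⟨db, hdb, hltdb⟩
          · rw [hs0] at h; cases h
          · rw [hs0] at hdb; cases hdb; omega
        · rw [pvD_set_ne (fun h => hbs h.symm)]; exact hs0
      · intro i c h
        by_cases hib : i = b.toNat
        · subst hib; rw [pvD_set_self hblen] at h; cases h; exact ht
        · rw [pvD_set_ne hib] at h; exact hnn i c h
      · intro i c h
        by_cases hib : i = b.toNat
        · subst hib
          rw [pvD_set_self hblen] at h
          cases h
          have h2 : ((b.toNat : Nat) : Int) = b := by omega
          rw [h2]
          exact hc
        · rw [pvD_set_ne hib] at h; exact hre i c h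
    rcases hgb : pvGetO st.1 b with _ | db
    · have hdb : pvD st.1 b.toNat = none := hgb
      have hre1 : pvRelaxE st a b w = (st.1.set b.toNat (some (da + w)), true) := by
        unfold pvRelaxE pvSetO; rw [hga, hgb]
      rw [hre1]
      refine ⟨?_, ?_, ?_, by simp⟩
      · exact hset _ ht0 hconnb (Or.inl hdb)
      · intro i c h
        by_cases hib : i = b.toNat
        · subst hib; rw [hdb] at h; cases h
        · rw [pvD_set_ne hib]; exact ⟨c, h, le_refl c⟩
      · right
        constructor
        · simp only [pvLex2, Bool.or_eq_true, decide_eq_true_eq]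
          left
          exact pvSet_measure_none hblen hdb (da + w)
        · rfl
    · have hdb : pvD st.1 b.toNat = some db := hgb
      by_cases hlt : da + w < db
      · have hre1 : pvRelaxE st a b w = (st.1.set b.toNat (some (da + w)), true) := by
          unfold pvRelaxE pvSetO; rw [hga, hgb]; simp [hlt]
        rw [hre1]
        refine ⟨?_, ?_, ?_, by simp⟩
        · exact hset _ ht0 hconnb (Or.inr ⟨db, hdb, hlt⟩)
        · intro i c h
          by_cases hib : i = b.toNat
          · subst hib
            rw [hdb] at h
            cases h
            exact ⟨da + w, pvD_set_self hblen _, by omega⟩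
          · rw [pvD_set_ne hib]; exact ⟨c, h, le_refl c⟩
        · right
          have := pvSet_measure_some hdb ht0 hlt
          constructor
          · simp only [pvLex2, Bool.or_eq_true, decide_eq_true_eq, Bool.and_eq_true, beq_iff_eq]
            right
            exact ⟨this.1, this.2⟩
          · rfl
      · have hre1 : pvRelaxE st a b w = st := by
          unfold pvRelaxE; rw [hga, hgb]; simp [hlt]
        rw [hre1]
        refine ⟨⟨hlen, hs0, hnn, hre⟩, fun i c h => ⟨c, h, le_refl c⟩, Or.inl rfl, fun _ => ⟨rfl, ?_⟩⟩
        intro da' hda'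
        rw [hda] at hda'
        cases hda'
        exact ⟨db, hdb, by omega⟩

lemma pvBFPass_aux {n : Int} {edges : List (List Int)} {s : Int} (hok : pvRowsOk n edges) :
    ∀ (es : List (List Int)), (∀ e ∈ es, e ∈ edges) →
    ∀ (d : List (Option Int)) (b0 : Bool), pvInvB n edges s d →
    let st := es.foldl (fun st e =>
      match e with
      | [u, v, w] => pvRelaxE (pvRelaxE st u v w) v u w
      | _ => st) (d, b0)
    pvInvB n edges s st.1 ∧
    (∀ i c, pvD d i = some c → ∃ c', pvD st.1 i = some c' ∧ c' ≤ c) ∧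
    ((st.1 = d ∧ st.2 = b0) ∨
      (pvLex2 (pvInfC st.1, pvFinS st.1) (pvInfC d, pvFinS d) = true ∧ st.2 = true)) ∧
    (st.2 = false → ∀ u v w, [u, v, w] ∈ es →
      (∀ cu, pvD d u.toNat = some cu → ∃ cv, pvD d v.toNat = some cv ∧ cv ≤ cu + w) ∧
      (∀ cv, pvD d v.toNat = some cv → ∃ cu, pvD d u.toNat = some cu ∧ cu ≤ cv + w)) := by
  intro es
  induction es with
  | nil =>
    intro _ d b0 hinv
    exact ⟨hinv, fun i c h => ⟨c, h, le_refl c⟩, Or.inl ⟨rfl, rfl⟩, by simp⟩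
  | cons r rs ih =>
    intro hsub d b0 hinv
    have hrE : r ∈ edges := hsub r (by simp)
    have hrok := hok r hrE
    match r, hrok, hrE with
    | [u, v, w], hrok, hrE =>
      simp only [pvOkRow, Bool.and_eq_true, decide_eq_true_eq] at hrok
      obtain ⟨⟨⟨⟨hu0, hun⟩, hv0⟩, hvn⟩, hw0⟩ := hrok
      have hsym : pvSymE edges u v w := Or.inl hrE
      simp only [List.foldl_cons]
      obtain ⟨e1, e2, e3, e4⟩ :=
        pvRelaxE_spec (n := n) (s := s) (d, b0) u v w hu0 hv0 hvn hw0 hsym hinv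
      set st1 := pvRelaxE (d, b0) u v w with hst1
      obtain ⟨f1, f2, f3, f4⟩ :=
        pvRelaxE_spec (n := n) (s := s) st1 v u w hv0 hu0 hun hw0 (pvSymE_swap hsym) e1
      set st2 := pvRelaxE st1 v u w with hst2
      obtain ⟨g1, g2, g3, g4⟩ := ih (fun e he => hsub e (by simp [he])) st2.1 st2.2 f1
      have hpair : (st2.1, st2.2) = st2 := rfl
      rw [hpair] at g1 g2 g3 g4
      refine ⟨g1, ?_, ?_, ?_⟩
      · intro i c h
        obtain ⟨c1, h1, hle1⟩ := e2 i c h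
        obtain ⟨c2, h2, hle2⟩ := f2 i c1 h1
        obtain ⟨c3, h3, hle3⟩ := g2 i c2 h2
        exact ⟨c3, h3, by omega⟩
      · -- measure / identity composition
        have hE : (st1.1 = d ∧ st1.2 = b0) ∨
            (pvLex2 (pvInfC st1.1, pvFinS st1.1) (pvInfC d, pvFinS d) = true ∧ st1.2 = true) := by
          rcases e3 with ee | ⟨elex, eb⟩
          · left; rw [ee]; exact ⟨rfl, rfl⟩
          · right; exact ⟨elex, eb⟩
        have hF : (st2.1 = st1.1 ∧ st2.2 = st1.2) ∨
            (pvLex2 (pvInfC st2.1, pvFinS st2.1) (pvInfC st1.1, pvFinS st1.1) = true ∧ st2.2 = true) := by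
          rcases f3 with ff | ⟨flex, fb⟩
          · left; rw [ff]; exact ⟨rfl, rfl⟩
          · right; exact ⟨flex, fb⟩
        have hEF : (st2.1 = d ∧ st2.2 = b0) ∨
            (pvLex2 (pvInfC st2.1, pvFinS st2.1) (pvInfC d, pvFinS d) = true ∧ st2.2 = true) := by
          rcases hF with ⟨f1', f2'⟩ | ⟨flex, fb⟩
          · rcases hE with ⟨e1', e2'⟩ | ⟨elex, eb⟩
            · left; rw [f1', e1', f2', e2']; exact ⟨rfl, rfl⟩
            · right; rw [f1', f2']; exact ⟨elex, eb⟩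
          · rcases hE with ⟨e1', _⟩ | ⟨elex, _⟩
            · right; rw [e1'] at flex; exact ⟨flex, fb⟩
            · right; exact ⟨pvLex2_trans flex elex, fb⟩
        rcases g3 with ⟨gd, gb⟩ | ⟨glex, gb⟩
        · rcases hEF with ⟨p1, p2⟩ | ⟨plex, pb⟩
          · left; rw [gd, gb, p1, p2]; exact ⟨rfl, rfl⟩
          · right; rw [gd, gb]; exact ⟨plex, pb⟩
        · rcases hEF with ⟨p1, _⟩ | ⟨plex, _⟩
          · right; rw [p1] at glex; exact ⟨glex, gb⟩
          · right; exact ⟨pvLex2_trans glex plex, gb⟩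
      · -- final flag false: stability for all rows of the cons
        intro hfalse u' v' w' hmem
        have hg4 := g4 hfalse
        rcases g3 with ⟨gd, gb⟩ | ⟨glex, gb⟩
        · have hst2b : st2.2 = false := by rw [← gb]; exact hfalse
          obtain ⟨hf_eq, hf_stab⟩ := f4 hst2b
          have hst1b : st1.2 = false := by
            rw [← hf_eq, hst2b]
          obtain ⟨he_eq, he_stab⟩ := e4 hst1b
          have hd1 : st1.1 = d := by rw [he_eq]
          have hd2 : st2.1 = d := by rw [hf_eq, hd1]
          rcases List.mem_cons.1 hmem with hr | hmem'
          · have huv : u' = u ∧ v' = v ∧ w' = w := by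
              injection hr.symm with a1 h1
              injection h1 with a2 h2
              injection h2 with a3 _
              exact ⟨a1.symm, a2.symm, a3.symm⟩
            obtain ⟨r1, r2, r3⟩ := huv
            subst r1; subst r2; subst r3
            constructor
            · intro cu hcu
              exact he_stab cu hcu
            · intro cv hcv
              rw [← hd1] at hcv
              obtain ⟨cu, hcu, hle⟩ := hf_stab cv hcv
              rw [he_eq] at hcu
              exact ⟨cu, hcu, hle⟩
          · have := hg4 u' v' w' hmem'
            rw [hd2] at this
            exact this
        · rw [gb] at hfalse; cases hfalse


lemma pvBFPass_spec {n : Int} {edges : List (List Int)} {s : Int} {d : List (Option Int)}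
    (hok : pvRowsOk n edges) (hinv : pvInvB n edges s d) :
    let st := pvBFPass edges d
    pvInvB n edges s st.1 ∧
    (st.2 = false → st.1 = d ∧
      (∀ u v w, pvSymE edges u v w → ∀ cu, pvD d u.toNat = some cu →
        ∃ cv, pvD d v.toNat = some cv ∧ cv ≤ cu + w)) ∧
    (st.2 = true → pvLex2 (pvInfC st.1, pvFinS st.1) (pvInfC d, pvFinS d) = true) := by
  obtain ⟨a1, a2, a3, a4⟩ := pvBFPass_aux (s := s) hok edges (fun e he => he) d false hinv
  have e : pvBFPass edges d = edges.foldl (fun st e =>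
    match e with
    | [u, v, w] => pvRelaxE (pvRelaxE st u v w) v u w
    | _ => st) (d, false) := rfl
  rw [← e] at a1 a2 a3 a4
  refine ⟨a1, ?_, ?_⟩
  · intro hf
    rcases a3 with ⟨h1, _⟩ | ⟨_, h2⟩
    · refine ⟨h1, ?_⟩
      intro u v w hsym cu hcu
      rcases hsym with hr | hr
      · exact (a4 hf u v w hr).1 cu hcu
      · exact (a4 hf v u w hr).2 cu hcu
    · rw [h2] at hf; cases hf
  · intro ht
    rcases a3 with ⟨_, h2⟩ | ⟨h1, _⟩
    · rw [h2] at ht; cases ht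
    · exact h1

-- ---- B's loop establishes Good ----
lemma pvBFLoop_good {n : Int} {edges : List (List Int)} {s : Int}
    (hok : pvRowsOk n edges) :
    ∀ d, pvInvB n edges s d → pvGoodD n edges s (pvBFLoop edges d) := by
  intro d
  induction d using pvBFLoop.induct (edges := edges) with
  | case1 d stv htrue hguard ih1 =>
    intro hinv
    obtain ⟨b1, b2, b3⟩ := pvBFPass_spec hok hinv
    rw [pvBFLoop]
    rw [if_pos htrue, dif_pos hguard]
    exact ih1 (b1 : pvInvB n edges s (pvBFPass edges d).1)
  | case2 d stv htrue hguard =>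
    intro hinv
    exfalso
    obtain ⟨b1, b2, b3⟩ := pvBFPass_spec hok hinv
    exact hguard (b3 htrue)
  | case3 d stv hfalse =>
    intro hinv
    obtain ⟨b1, b2, b3⟩ := pvBFPass_spec hok hinv
    rw [pvBFLoop]
    rw [if_neg hfalse]
    have hf : stv.2 = false := by
      cases hsv : stv.2
      · rfl
      · exact absurd hsv hfalse
    obtain ⟨hde, hstab⟩ := b2 hf
    obtain ⟨hlen, hs0, hnn, hre⟩ := hinv
    have hde' : stv.1 = d := hde
    rw [show (pvBFPass edges d).1 = stv.1 from rfl, hde']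
    exact ⟨hlen, hs0, hstab, fun i c h => hre i c h⟩

-- ---- initial state ----
lemma pvInit_spec {n s : Int} (h0 : 0 ≤ s) (hsn : s < n) :
    ∀ i c, pvD ((List.replicate n.toNat (none : Option Int)).set s.toNat (some 0)) i = some c →
      i = s.toNat ∧ c = 0 := by
  intro i c h
  unfold pvD at h
  by_cases hi : i = s.toNat
  · subst hi
    rw [List.getD_eq_getElem?_getD, List.getElem?_set_self (by simp; omega)] at h
    simp at h
    exact ⟨rfl, h.symm⟩
  · rw [List.getD_eq_getElem?_getD, List.getElem?_set_ne (by omega)] at h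
    by_cases hlt : i < n.toNat
    · rw [List.getElem?_replicate_of_lt (by simpa using hlt)] at h; simp at h
    · rw [List.getElem?_eq_none (by simp; omega)] at h; simp at h

-- ---- the two per-source runs agree ----
lemma pvSource_eq {n : Int} {edges : List (List Int)} (hok : pvRowsOk n edges)
    {s : Int} (h0 : 0 ≤ s) (hsn : s < n) :
    pvDijLoop (pvBuildGraph n edges) ((List.replicate n.toNat (none : Option Int)).set s.toNat (some 0)) [(0, s)]
      = pvBFLoop edges ((List.replicate n.toNat (none : Option Int)).set s.toNat (some 0)) := by
  set d0 := (List.replicate n.toNat (none : Option Int)).set s.toNat (some 0) with hd0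
  have hstN : s.toNat < n.toNat := by omega
  have hlen : d0.length = n.toNat := by simp [hd0]
  have hs0 : pvD d0 s.toNat = some 0 := by
    rw [hd0]
    exact pvD_set_self (by simp; omega) _
  have hcast : ((s.toNat : Nat) : Int) = s := by omega
  have hnn : ∀ i c, pvD d0 i = some c → 0 ≤ c := by
    intro i c h
    obtain ⟨_, hc⟩ := pvInit_spec h0 hsn i c h
    omega
  have hre : ∀ i c, pvD d0 i = some c → pvConn edges s (i : Int) c := by
    intro i c h
    obtain ⟨hi, hc⟩ := pvInit_spec h0 hsn i c h
    subst hi; subst hc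
    rw [hcast]
    exact pvConn.refl
  have hinvB : pvInvB n edges s d0 := ⟨hlen, hs0, hnn, hre⟩
  have hinvA : pvInvA n edges s d0 [(0, s)] := by
    refine ⟨hlen, hs0, hnn, hre, ?_, ?_⟩
    · intro pu hpu
      simp only [List.mem_singleton] at hpu
      subst hpu
      exact ⟨h0, hsn, 0, hs0, le_refl 0⟩
    · intro i c h
      obtain ⟨hi, hc⟩ := pvInit_spec h0 hsn i c h
      subst hi; subst hc
      left
      rw [hcast]
      simp
  have g1 := pvDijLoop_good (s := s) hok d0 [(0, s)] hinvA
  have g2 := pvBFLoop_good (s := s) hok d0 hinvB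
  exact pvGood_unique g1 g2

-- ---- the two selection folds agree ----
lemma pvSel_eq (cA cB : Int → Int) (xs : List Int)
    (hx : xs.Pairwise (· < ·)) (hc : ∀ x ∈ xs, cA x = cB x) :
    ∀ (st : Option Int × Int), (∀ x ∈ xs, st.2 < x) →
      (xs.foldl (fun (st : Option Int × Int) city =>
        match st.1 with
        | none => (some (cA city), city)
        | some L =>
          if cA city < L then (some (cA city), city)
          else if cA city = L ∧ st.2 < city then (some L, city)
          else st) st) =
      (xs.foldl (fun (st : Option Int × Int) s =>
        match st.1 with
        | none => (some (cB s), s)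
        | some b => if cB s ≤ b then (some (cB s), s) else st) st) := by
  revert hx hc
  induction xs with
  | nil => intro _ _ st _; rfl
  | cons x xs ih =>
    intro hx hc st hst
    have hxlt := (List.pairwise_cons.1 hx).1
    have hxtail := (List.pairwise_cons.1 hx).2
    have hcx : cA x = cB x := hc x (by simp)
    have hsx : st.2 < x := hst x (by simp)
    simp only [List.foldl_cons]
    have hstep : (match st.1 with
        | none => (some (cA x), x)
        | some L =>
          if cA x < L then (some (cA x), x)
          else if cA x = L ∧ st.2 < x then (some L, x)
          else st) =
        (match st.1 with
        | none => (some (cB x), x)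
        | some b => if cB x ≤ b then (some (cB x), x) else st) := by
      rcases hL : st.1 with _ | L
      · simp [hcx]
      · by_cases h1 : cA x < L
        · have h1' : cB x < L := by omega
          have h2' : cB x ≤ L := by omega
          simp [hcx, h1', h2']
        · by_cases h2 : cA x = L
          · have h2' : cB x = L := by omega
            have h3' : ¬ cB x < L := by omega
            have h4' : cB x ≤ L := by omega
            simp [hcx, h2', h3', h4', hsx]
          · have h3' : ¬ cB x < L := by omega
            have h4' : ¬ (cB x = L) := by omega
            have h5' : ¬ cB x ≤ L := by omega
            simp [hcx, h3', h4', h5']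
    rw [hstep]
    apply ih hxtail (fun y hy => hc y (by simp [hy]))
    intro y hy
    rcases hM : (match st.1 with
        | none => (some (cB x), x)
        | some b => if cB x ≤ b then (some (cB x), x) else st) with ⟨L', c'⟩
    have hcc : c' = x ∨ c' = st.2 := by
      rcases hL : st.1 with _ | L
      · rw [hL] at hM
        simp at hM
        left; exact hM.2.symm
      · rw [hL] at hM
        by_cases h1 : cB x ≤ L
        · simp [h1] at hM
          left; exact hM.2.symm
        · simp [h1] at hM
          right; rw [hM]
    rw [hM]
    show c' < y
    have hy1 : x < y := hxlt y hy
    have hy2 : st.2 < y := hst y (by simp [hy])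
    rcases hcc with h | h <;> omega

-- ===== VERDICT (by name: the statement is the Claim_ definition above) =====
theorem specialHub_spec : Claim_equal_specialHub := by
  intro n edges distanceThreshold _hdom hpre
  unfold Spec_specialHub
  have hok : pvRowsOk n edges := by
    intro e he
    exact List.all_eq_true.1 hpre e he
  unfold specialHub specialHub_alt
  refine congrArg Prod.snd ?_
  apply pvSel_eq
    (fun city => pvCount distanceThreshold
      (pvDijLoop (pvBuildGraph n edges)
        ((List.replicate n.toNat (none : Option Int)).set city.toNat (some 0)) [(0, city)]))
    (fun city => pvCount distanceThreshold
      (pvBFLoop edges ((List.replicate n.toNat (none : Option Int)).set city.toNat (some 0))))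
    (PySem.List.pyRange 0 n 1)
    (PySem.List.pairwise_lt_pyRange_one 0 n)
    ?_ ((none : Option Int), -1) ?_
  · intro x hxm
    have hx := (PySem.List.mem_pyRange_one).1 hxm
    exact congrArg (pvCount distanceThreshold) (pvSource_eq hok hx.1 hx.2)
  · intro x hxm
    have hx := (PySem.List.mem_pyRange_one).1 hxm
    exact (by omega : (-1 : Int) < x)
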